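-- pv_equiv track=rewrite | github.com/Gilberto-xyz/SubLLM | traducir_subtitulos.py | repair_issue_score
-- ===== SOURCE A (Python) =====
-- from typing import Any, List, Tuple, TypeVar
--
-- def repair_issue_score(reasons: List[str]) -> int:
--     weights = {
--         "empty_output": 6,
--         "placeholder_mismatch": 6,
--         "unchanged": 6,
--         "duplicate_output": 6,
--         "short_line_overflow": 5,
--         "length_mismatch": 4,
--         "placeholder_artifacts": 5,
--         "unexpected_ass_markup": 4,
--         "language_leak": 4,
--         "very_suspicious": 2,
--     }
--     return sum(weights.get(reason, 1) for reason in reasons)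
-- ===== SOURCE B (Python) =====
-- def repair_issue_score(reasons):
--     # tier decomposition: each reason contributes 1 (the default), plus a tier bonus
--     tier6 = ("empty_output", "placeholder_mismatch", "unchanged", "duplicate_output")
--     tier5 = ("short_line_overflow", "placeholder_artifacts")
--     tier4 = ("length_mismatch", "unexpected_ass_markup", "language_leak")
--     n6 = sum(1 for r in reasons if r in tier6)
--     n5 = sum(1 for r in reasons if r in tier5)
--     n4 = sum(1 for r in reasons if r in tier4)
--     n2 = sum(1 for r in reasons if r == "very_suspicious")
--     return len(reasons) + 5 * n6 + 4 * n5 + 3 * n4 + n2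
-- ===== Notes on version B (the rewrite author's own statement) =====
-- stated objective: alternative
-- what changed: B drops the weights dict entirely: it groups the keys into weight tiers, counts how many reasons fall in each tier, and computes len(reasons) plus the per-tier bonuses (weight-1) arithmetically, instead of A's per-element dict lookup sum.
import Mathlib
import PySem

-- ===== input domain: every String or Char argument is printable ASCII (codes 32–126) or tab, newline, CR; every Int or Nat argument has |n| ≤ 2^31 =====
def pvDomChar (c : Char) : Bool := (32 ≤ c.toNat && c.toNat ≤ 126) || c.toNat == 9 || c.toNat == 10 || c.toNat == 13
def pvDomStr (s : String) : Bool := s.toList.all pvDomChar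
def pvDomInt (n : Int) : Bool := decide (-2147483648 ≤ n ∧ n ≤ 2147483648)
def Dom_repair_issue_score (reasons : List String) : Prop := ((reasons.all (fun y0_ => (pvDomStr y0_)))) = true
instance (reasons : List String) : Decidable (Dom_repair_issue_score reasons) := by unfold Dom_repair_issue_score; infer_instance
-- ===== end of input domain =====

-- B replaces the weights dict with weight tiers counted per pass and an arithmetic total (alternative decomposition, same results).
-- ===== PORT A =====
def pvWeightsA : PySem.Dict String Int :=
  PySem.Dict.ofList [("empty_output", 6), ("placeholder_mismatch", 6), ("unchanged", 6),
    ("duplicate_output", 6), ("short_line_overflow", 5), ("length_mismatch", 4),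
    ("placeholder_artifacts", 5), ("unexpected_ass_markup", 4), ("language_leak", 4),
    ("very_suspicious", 2)]

def repair_issue_score (reasons : List String) : Int :=
  reasons.foldl (fun acc reason => acc + pvWeightsA.getD reason 1) 0

-- ===== PORT B =====
def pvTier6 : List String := ["empty_output", "placeholder_mismatch", "unchanged", "duplicate_output"]
def pvTier5 : List String := ["short_line_overflow", "placeholder_artifacts"]
def pvTier4 : List String := ["length_mismatch", "unexpected_ass_markup", "language_leak"]

def repair_issue_score_alt (reasons : List String) : Int :=
  let n6 := reasons.countP (fun r => pvTier6.contains r)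
  let n5 := reasons.countP (fun r => pvTier5.contains r)
  let n4 := reasons.countP (fun r => pvTier4.contains r)
  let n2 := reasons.countP (fun r => r == "very_suspicious")
  (reasons.length : Int) + 5 * (n6 : Int) + 4 * (n5 : Int) + 3 * (n4 : Int) + (n2 : Int)

-- ===== PRECONDITION & SPEC =====
def Spec_repair_issue_score (reasons : List String) (out : Int) : Prop := out = repair_issue_score_alt reasons
instance (reasons : List String) (out : Int) : Decidable (Spec_repair_issue_score reasons out) := by unfold Spec_repair_issue_score; infer_instance

-- ===== CLAIM =====
def Claim_equal_repair_issue_score : Prop := ∀ (reasons : List String), Dom_repair_issue_score reasons → Spec_repair_issue_score reasons (repair_issue_score reasons)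

-- ===== LEMMAS AND PROOFS =====

-- per-element correspondence: A's dict weight = 1 + tier bonuses
theorem pv_weight_tier (r : String) :
    pvWeightsA.getD r 1
      = 1 + 5 * (if pvTier6.contains r then (1 : Int) else 0)
          + 4 * (if pvTier5.contains r then (1 : Int) else 0)
          + 3 * (if pvTier4.contains r then (1 : Int) else 0)
          + (if r == "very_suspicious" then (1 : Int) else 0) := by
  simp only [pvWeightsA, pvTier6, pvTier5, pvTier4, PySem.Dict.ofList, PySem.Dict.update,
    List.foldl_cons, List.foldl_nil, PySem.Dict.getD_insert, PySem.Dict.getD_empty,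
    List.contains_eq_mem, List.mem_cons, List.not_mem_nil, decide_eq_true_eq, beq_iff_eq]
  split_ifs <;> simp_all

theorem pv_tier_sum (reasons : List String) :
    repair_issue_score reasons = repair_issue_score_alt reasons := by
  induction reasons with
  | nil => rfl
  | cons x t ih =>
    have hA : ∀ (l : List String) (a : Int),
        l.foldl (fun acc reason => acc + pvWeightsA.getD reason 1) a
          = a + l.foldl (fun acc reason => acc + pvWeightsA.getD reason 1) 0 := by
      intro l
      induction l with
      | nil => intro a; simp
      | cons y s ihl =>
        intro a
        simp only [List.foldl_cons]
        rw [ihl (a + pvWeightsA.getD y 1), ihl (0 + pvWeightsA.getD y 1)]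
        ring
    simp only [repair_issue_score, List.foldl_cons] at ih ⊢
    rw [hA t (0 + pvWeightsA.getD x 1), ih]
    simp only [repair_issue_score_alt, List.countP_cons, List.length_cons]
    rw [pv_weight_tier x]
    push_cast
    split_ifs <;> ring

-- ===== VERDICT =====
theorem repair_issue_score_spec : Claim_equal_repair_issue_score := by
  intro reasons _
  exact pv_tier_sum reasons
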